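-- pv_equiv track=rewrite | github.com/yonishelach/MAPF | AcceleratedSearchProj/Visualization.py | plan_to_frames
-- ===== SOURCE A (Python) =====
-- from copy import deepcopy
--
-- def plan_to_frames(plan):
--     frames = []
--     plan_copy = deepcopy(plan)
--     appended = True
--
--     while appended:
--         appended = False
--         frame = []
--         for i in range(len(plan_copy)):
--             if plan_copy[i]:
--                 frame.append(plan_copy[i].pop(0))
--                 appended = True
--             else:
--                 frame.append([])
--
--         if appended:
--             frames.append(frame)
--
--     return frames
-- ===== SOURCE B (Python) =====
-- from itertools import zip_longest
--
-- def plan_to_frames(plan):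
--     return [list(frame) for frame in zip_longest(*plan, fillvalue=[])]
-- ===== Notes on version B (the rewrite author's own statement) =====
-- stated objective: idiomatic
-- what changed: Replaces the deepcopy + destructive pop(0) while-loop with a ragged transpose via itertools.zip_longest over the agent paths, filling exhausted agents with an empty step; no mutation, counter or appended flag is maintained.
import Mathlib
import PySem

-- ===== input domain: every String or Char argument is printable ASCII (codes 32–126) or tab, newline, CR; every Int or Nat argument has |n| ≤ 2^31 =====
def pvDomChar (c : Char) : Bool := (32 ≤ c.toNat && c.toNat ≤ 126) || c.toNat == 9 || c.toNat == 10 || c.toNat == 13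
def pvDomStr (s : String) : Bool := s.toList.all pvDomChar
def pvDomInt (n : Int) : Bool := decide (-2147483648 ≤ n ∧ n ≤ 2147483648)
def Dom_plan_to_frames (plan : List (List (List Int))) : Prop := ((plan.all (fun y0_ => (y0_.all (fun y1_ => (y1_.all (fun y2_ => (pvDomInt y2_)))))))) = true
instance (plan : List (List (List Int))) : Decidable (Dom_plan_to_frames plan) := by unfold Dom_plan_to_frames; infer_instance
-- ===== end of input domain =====

-- B replaces A's deepcopy + destructive pop(0) while-loop by an itertools.zip_longest
-- ragged transpose (ported as an index over the longest path); A works on a deepcopy, so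
-- neither program mutates the argument.

-- ===== PORT A =====
-- termination helpers for A's while-loop (sum of remaining path lengths decreases)
theorem pvSumTail_le : ∀ (pc : List (List (List Int))),
    ((pc.map List.tail).map List.length).sum ≤ (pc.map List.length).sum := by
  intro pc
  induction pc with
  | nil => simp
  | cons p ps ih =>
    simp only [List.map_cons, List.sum_cons]
    have : p.tail.length ≤ p.length := by cases p <;> simp
    omega

theorem pvSumTail_lt : ∀ (pc : List (List (List Int))),
    pc.any (fun p => !p.isEmpty) = true →
    ((pc.map List.tail).map List.length).sum < (pc.map List.length).sum := by
  intro pc h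
  induction pc with
  | nil => simp at h
  | cons p ps ih =>
    simp only [List.any_cons, Bool.or_eq_true] at h
    simp only [List.map_cons, List.sum_cons]
    rcases h with h | h
    · have hp : p.tail.length < p.length := by
        cases p with
        | nil => simp at h
        | cons a as => simp
      have := pvSumTail_le ps
      omega
    · have := ih h
      have hp : p.tail.length ≤ p.length := by cases p <;> simp
      omega

-- A's while-loop: each iteration builds one frame from the heads, then pops them.
def planToFramesLoop (pc : List (List (List Int))) : List (List (List Int)) :=
  if h : pc.any (fun p => !p.isEmpty) = true then
    (pc.map (fun p => p.headD [])) :: planToFramesLoop (pc.map List.tail)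
  else []
termination_by (pc.map List.length).sum
decreasing_by simpa using pvSumTail_lt pc h

def plan_to_frames (plan : List (List (List Int))) : List (List (List Int)) :=
  planToFramesLoop plan

-- ===== PORT B =====
-- zip_longest over the agent paths produces one column per timestep t < max path length;
-- column t holds each path's t-th entry, an empty step once that path is exhausted.
def plan_to_frames_alt (plan : List (List (List Int))) : List (List (List Int)) :=
  (List.range ((plan.map List.length).foldl Nat.max 0)).map
    (fun t => plan.map (fun p => p.getD t []))

-- ===== PRECONDITION & SPEC =====
def Spec_plan_to_frames (plan : List (List (List Int))) (out : List (List (List Int))) : Prop := out = plan_to_frames_alt plan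
instance (plan : List (List (List Int))) (out : List (List (List Int))) : Decidable (Spec_plan_to_frames plan out) := by unfold Spec_plan_to_frames; infer_instance

-- ===== CLAIM (what is proved, stated in full; the proofs are below) =====
def Claim_equal_plan_to_frames : Prop := ∀ (plan : List (List (List Int))), Dom_plan_to_frames plan → Spec_plan_to_frames plan (plan_to_frames plan)

-- ===== LEMMAS AND PROOFS =====

theorem pvFoldlMax_eq_zero : ∀ (xs : List Nat) (a : Nat),
    xs.foldl Nat.max a = 0 ↔ (a = 0 ∧ ∀ x ∈ xs, x = 0) := by
  intro xs
  induction xs with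
  | nil => simp
  | cons x xs ih =>
    intro a
    simp only [List.foldl_cons, ih, List.mem_cons, Nat.max_eq_zero_iff]
    constructor
    · rintro ⟨⟨ha, hx⟩, h2⟩
      refine ⟨ha, ?_⟩
      rintro y (rfl | hy)
      · exact hx
      · exact h2 y hy
    · rintro ⟨ha, h⟩
      exact ⟨⟨ha, h x (Or.inl rfl)⟩, fun y hy => h y (Or.inr hy)⟩

theorem pvFoldlMax_tail : ∀ (xs : List Nat) (a : Nat),
    (xs.map (fun n => n - 1)).foldl Nat.max (a - 1) = xs.foldl Nat.max a - 1 := by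
  intro xs
  induction xs with
  | nil => simp
  | cons x xs ih =>
    intro a
    simp only [List.map_cons, List.foldl_cons]
    rw [show Nat.max (a - 1) (x - 1) = Nat.max a x - 1 from Nat.sub_max_sub_right a x 1]
    exact ih _

theorem pvTailLengths (pc : List (List (List Int))) :
    ((pc.map List.tail).map List.length).foldl Nat.max 0
      = (pc.map List.length).foldl Nat.max 0 - 1 := by
  have h : (pc.map List.tail).map List.length = (pc.map List.length).map (fun n => n - 1) := by
    simp only [List.map_map]
    apply List.map_congr_left
    intro p _
    cases p <;> simp
  rw [h, show (0 : Nat) = 0 - 1 by rfl, pvFoldlMax_tail]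

theorem pvGetD_tail (p : List (List Int)) (t : Nat) :
    p.tail.getD t [] = p.getD (t + 1) [] := by
  cases p <;> simp [List.getD]

theorem loop_eq : ∀ (n : Nat) (pc : List (List (List Int))),
    (pc.map List.length).foldl Nat.max 0 = n →
    planToFramesLoop pc = (List.range n).map (fun t => pc.map (fun p => p.getD t [])) := by
  intro n
  induction n with
  | zero =>
    intro pc hM
    have hall := (pvFoldlMax_eq_zero _ 0).mp hM
    have hany : pc.any (fun p => !p.isEmpty) = false := by
      rw [List.any_eq_false]
      intro p hp
      have : p.length = 0 := hall.2 p.length (List.mem_map_of_mem hp)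
      simp [List.length_eq_zero_iff.mp this]
    rw [planToFramesLoop.eq_def]
    simp [hany]
  | succ m ih =>
    intro pc hM
    have hany : pc.any (fun p => !p.isEmpty) = true := by
      by_contra hc
      have hc' : pc.any (fun p => !p.isEmpty) = false := by
        cases h : pc.any (fun p => !p.isEmpty) <;> simp_all
      have : (pc.map List.length).foldl Nat.max 0 = 0 := by
        rw [pvFoldlMax_eq_zero]
        refine ⟨rfl, ?_⟩
        intro x hx
        rw [List.mem_map] at hx
        obtain ⟨p, hp, rfl⟩ := hx
        rw [List.any_eq_false] at hc'
        have := hc' p hp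
        cases p <;> simp_all
      omega
    have hMt : ((pc.map List.tail).map List.length).foldl Nat.max 0 = m := by
      rw [pvTailLengths, hM]; omega
    rw [planToFramesLoop.eq_def]
    simp only [hany, dif_pos]
    rw [ih _ hMt, List.range_succ_eq_map]
    simp only [List.map_cons, List.map_map]
    congr 1
    · apply List.map_congr_left
      intro p _
      cases p <;> simp [List.getD]
    · apply List.map_congr_left
      intro t _
      apply List.map_congr_left
      intro p _
      simp only [Function.comp_apply]
      exact pvGetD_tail p t

-- ===== VERDICT (by name: the statement is the Claim_ definition above) =====
theorem plan_to_frames_spec : Claim_equal_plan_to_frames := by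
  intro plan _
  unfold Spec_plan_to_frames plan_to_frames plan_to_frames_alt
  exact loop_eq _ plan rfl
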